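-- pv_equiv track=rewrite | github.com/maxhormazabal/depencendy_parsing | nlu_model_utils.py | checkDeprel
-- ===== SOURCE A (Python) =====
-- def checkDeprel(vector):
--   vector = list(vector)
--   # Contamos cuántos elementos del vector son iguales a 'root'
--   root_count = vector.count('root')
--
--   # Si no hay ningún elemento igual a 'root'
--   if root_count == 0:
--     # Buscamos el primer elemento igual a '999'
--     for i, elem in enumerate(vector):
--       if elem == '999':
--         # Reemplazamos el elemento por 'root'
--         vector[i] = 'root'
--         break
--     # Si no existe ningún elemento igual a '999'
--     else:
--       # Reemplazamos el primer elemento del vector por 'root'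
--       vector[0] = 'root'
--
--   # Si hay más de un elemento igual a 'root'
--   elif root_count > 1:
--     # Recorremos el vector
--     first_root_index = vector.index('root')
--     for i, elem in enumerate(vector):
--       # Si el elemento es igual a 'root' y no es el primer elemento
--       if elem == 'root' and i != first_root_index:
--         # Reemplazamos el elemento por 'other'
--         vector[i] = 'other'
--
--   # Recorremos el vector
--   for i, elem in enumerate(vector):
--     # Si el elemento es igual a '999'
--     if elem == '999':
--       # Reemplazamos el elemento por 'other'
--       vector[i] = 'other'
--   return vector
-- ===== SOURCE B (Python) =====
-- def checkDeprel(vector):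
--     vector = list(vector)
--     if 'root' in vector:
--         k = vector.index('root')
--     elif '999' in vector:
--         k = vector.index('999')
--     else:
--         k = 0
--     return ['root' if i == k else ('other' if e in ('root', '999') else e)
--             for i, e in enumerate(vector)]
-- ===== Notes on version B (the rewrite author's own statement) =====
-- stated objective: simpler
-- what changed: Instead of A's three mutation passes (find-and-replace '999'/first element, demote duplicate 'root's, then demote remaining '999's), B computes one promote index up front and builds the result in a single comprehension pass.
import Mathlib
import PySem

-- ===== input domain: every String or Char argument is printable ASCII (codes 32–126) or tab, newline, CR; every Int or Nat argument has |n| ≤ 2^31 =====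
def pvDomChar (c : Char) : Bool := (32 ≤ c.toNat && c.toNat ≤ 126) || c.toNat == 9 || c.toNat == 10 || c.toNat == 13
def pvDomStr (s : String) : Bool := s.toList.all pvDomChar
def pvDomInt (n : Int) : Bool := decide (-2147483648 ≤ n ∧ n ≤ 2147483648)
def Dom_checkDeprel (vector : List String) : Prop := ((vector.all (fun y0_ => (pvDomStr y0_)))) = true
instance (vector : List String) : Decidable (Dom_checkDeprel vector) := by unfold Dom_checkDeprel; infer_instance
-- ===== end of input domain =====

-- B replaces A's three mutation passes by one precomputed promote index and a single
-- rebuild pass (objective: simpler); A copies its argument, so no caller-visible mutation.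


-- ===== PORT A =====
-- the 'for … if elem == '999': vector[i] = 'root'; break / else:' loop:
-- replaces the first '999' by 'root', none if no '999' is found
def pvSetFirst999 : List String → Option (List String)
  | [] => none
  | x :: xs => if x = "999" then some ("root" :: xs) else (pvSetFirst999 xs).map (x :: ·)

def checkDeprel (vector : List String) : List String :=
  let rootCount := vector.count "root"
  let v1 :=
    if rootCount = 0 then
      match pvSetFirst999 vector with
      | some v => v
      | none => vector.set 0 "root"   -- vector[0] = 'root'; raises IndexError on [] (excluded by Pre_)
    else if 1 < rootCount then
      let fri := (PySem.List.index? vector "root").getD 0   -- index exists since count > 1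
      (PySem.List.enumerate vector).map
        (fun p => if p.2 = "root" ∧ p.1 ≠ (fri : Int) then "other" else p.2)
    else vector
  v1.map (fun e => if e = "999" then "other" else e)

-- ===== PORT B =====
def checkDeprel_alt (vector : List String) : List String :=
  let k : Nat :=
    if vector.contains "root" then (PySem.List.index? vector "root").getD 0
    else if vector.contains "999" then (PySem.List.index? vector "999").getD 0
    else 0
  (PySem.List.enumerate vector).map
    (fun p => if p.1 = (k : Int) then "root"
              else if p.2 = "root" ∨ p.2 = "999" then "other" else p.2)

-- ===== PRECONDITION & SPEC =====
-- Pre_ excludes only the empty list, on which A raises IndexError (vector[0] = 'root').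
def Pre_checkDeprel (vector : List String) : Prop := vector ≠ []
instance (vector : List String) : Decidable (Pre_checkDeprel vector) := by unfold Pre_checkDeprel; infer_instance
def pvWitness_checkDeprel : List String := ["a", "999"]

def Spec_checkDeprel (vector : List String) (out : List String) : Prop := out = checkDeprel_alt vector
instance (vector : List String) (out : List String) : Decidable (Spec_checkDeprel vector out) := by unfold Spec_checkDeprel; infer_instance

-- ===== CLAIM (what is proved, stated in full; the proofs are below) =====
def Claim_equal_checkDeprel : Prop := ∀ (vector : List String), Dom_checkDeprel vector → Pre_checkDeprel vector → Spec_checkDeprel vector (checkDeprel vector)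

-- ===== LEMMAS AND PROOFS =====

-- the for/break loop is 'set at the first index of "999"'
theorem pvSetFirst999_eq (v : List String) :
    pvSetFirst999 v = (PySem.List.index? v "999").map (fun j => v.set j "root") := by
  induction v with
  | nil => simp [pvSetFirst999]
  | cons x xs ih =>
    by_cases hx : x = "999"
    · subst hx
      rw [PySem.List.index?_cons_self]
      simp [pvSetFirst999]
    · rw [pvSetFirst999, if_neg hx, ih, PySem.List.index?_cons_of_ne xs hx]
      cases PySem.List.index? xs "999" <;> simp

-- count = 1: every position other than the first index of "root" is not "root"
theorem unique_root {v : List String} {j : Nat}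
    (hc : v.count "root" = 1) (hj : PySem.List.index? v "root" = some j)
    {i : Nat} (hi : i < v.length) (hij : i ≠ j) : v[i] ≠ "root" := by
  rw [PySem.List.index?_eq_some_iff] at hj
  obtain ⟨pre, suf, hv, hlen, hpre⟩ := hj
  subst hv
  have hcnt : pre.count "root" = 0 := List.count_eq_zero.mpr hpre
  have hsuf : suf.count "root" = 0 := by
    simp [List.count_append, hcnt] at hc ⊢
    omega
  have hlenp : pre.length = j := hlen
  rcases Nat.lt_or_ge i j with h | h
  · have hip : i < pre.length := by omega
    rw [List.getElem_append_left hip]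
    intro he
    exact (List.count_eq_zero.mp hcnt) (he ▸ List.getElem_mem hip)
  · have hgt : j < i := lt_of_le_of_ne h (Ne.symm hij)
    intro he
    have hlt : i - pre.length < ("root" :: suf).length := by
      simp at hi ⊢; omega
    have h1 : ("root" :: suf)[i - pre.length]'hlt = "root" := by
      rw [← List.getElem_append_right (by omega)]; exact he
    obtain ⟨m, hm⟩ : ∃ m, i - pre.length = m + 1 := ⟨i - pre.length - 1, by omega⟩
    simp only [hm, List.getElem_cons_succ] at h1
    exact (List.count_eq_zero.mp hsuf) (h1 ▸ List.getElem_mem _)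

theorem no_root_of_count_zero {v : List String} (hc : v.count "root" = 0)
    {i : Nat} (hi : i < v.length) : v[i] ≠ "root" := by
  intro he
  exact (List.count_eq_zero.mp hc) (he ▸ List.getElem_mem hi)

theorem checkDeprel_eq_alt (v : List String) (hne : v ≠ []) :
    checkDeprel v = checkDeprel_alt v := by
  have hpos : 0 < v.length := List.length_pos_iff.mpr hne
  unfold checkDeprel checkDeprel_alt
  by_cases hr0 : v.count "root" = 0
  · have hnr : v.contains "root" = false := by
      simp [List.count_eq_zero] at hr0; simpa using hr0
    cases h9 : PySem.List.index? v "999" with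
    | some j =>
      obtain ⟨hj, hvj, -⟩ := PySem.List.getElem_of_index?_eq_some h9
      have hc9 : v.contains "999" = true := by
        simpa using (hvj ▸ List.getElem_mem hj)
      simp only [hr0, hnr, hc9, pvSetFirst999_eq, h9]
      simp only [Option.map_some, if_true]
      apply List.ext_getElem (by simp)
      intro i hi1 hi2
      have hiv : i < v.length := by simpa using hi1
      simp only [List.getElem_map, PySem.List.getElem_enumerate, List.getElem_set]
      by_cases hij : i = j
      · subst hij; simp
      · have hnri : v[i] ≠ "root" := no_root_of_count_zero hr0 (by simp_all)
        simp [hij, hnri, Ne.symm hij]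
    | none =>
      have hc9 : v.contains "999" = false := by
        have := (PySem.List.index?_eq_none_iff v "999").mp h9
        simpa using this
      simp only [hr0, hnr, hc9, pvSetFirst999_eq, h9]
      have hn9 : "999" ∉ v := (PySem.List.index?_eq_none_iff v "999").mp h9
      have hn0 : "root" ∉ v := List.count_eq_zero.mp hr0
      simp only [Option.map_none, if_true]
      apply List.ext_getElem (by simp)
      intro i hi1 hi2
      have hiv : i < v.length := by simpa using hi1
      simp only [List.getElem_map, PySem.List.getElem_enumerate, List.getElem_set]
      by_cases hi0 : i = 0
      · subst hi0; simp
      · have h1 : v[i] ≠ "root" := fun he => hn0 (he ▸ List.getElem_mem (by simp_all))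
        have h2 : v[i] ≠ "999" := fun he => hn9 (he ▸ List.getElem_mem (by simp_all))
        simp [hi0, h1, h2, Ne.symm hi0]
  · have hmem : "root" ∈ v := List.count_pos_iff.mp (by omega)
    have hnr : v.contains "root" = true := by simpa using hmem
    obtain ⟨j, hjdef⟩ := Option.isSome_iff_exists.mp ((PySem.List.index?_isSome_iff v "root").mpr hmem)
    obtain ⟨hj, hvj, -⟩ := PySem.List.getElem_of_index?_eq_some hjdef
    by_cases hr1 : 1 < v.count "root"
    · simp only [hr0, hr1, hnr, hjdef]
      simp only [if_true, if_false, Option.getD_some, List.map_map]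
      apply List.ext_getElem (by simp)
      intro i hi1 hi2
      have hiv : i < v.length := by simpa using hi1
      simp only [List.getElem_map, PySem.List.getElem_enumerate, Function.comp_apply]
      by_cases hij : i = j
      · subst hij; simp [hvj]
      · by_cases hri : v[i] = "root"
        · simp [hij, hri]
        · simp [hij, hri]
    · have hc1 : v.count "root" = 1 := by omega
      simp only [hr0, hr1, hnr, hjdef]
      simp only [if_false, Option.getD_some]
      apply List.ext_getElem (by simp)
      intro i hi1 hi2
      have hiv : i < v.length := by simpa using hi1
      simp only [List.getElem_map, PySem.List.getElem_enumerate]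
      by_cases hij : i = j
      · subst hij; simp [hvj]
      · have hnri : v[i] ≠ "root" := unique_root hc1 hjdef (by simp_all) hij
        simp [hij, hnri, Ne.symm hij]

-- ===== VERDICT (by name: the statement is the Claim_ definition above) =====
theorem checkDeprel_spec : Claim_equal_checkDeprel := by
  intro v _ hne
  exact checkDeprel_eq_alt v hne
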